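-- pv_equiv track=rewrite | github.com/khraiwesh/cvdrift-multi-perspective | compare_all_methods.py | tp_fp_fn
-- ===== SOURCE A (Python) =====
-- def tp_fp_fn(detected, actual, tol):
--     if not actual:
--         return 0, len(detected), 0
--     if not detected:
--         return 0, 0, len(actual)
--     matched_a, matched_d = set(), set()
--     for d in detected:
--         for i, a in enumerate(actual):
--             if abs(d - a) <= tol and i not in matched_a:
--                 matched_a.add(i)
--                 matched_d.add(d)
--                 break
--     tp = len(matched_a)
--     return tp, len(detected) - len(matched_d), len(actual) - len(matched_a)
-- ===== SOURCE B (Python) =====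
-- def tp_fp_fn(detected, actual, tol):
--     remaining = list(actual)
--     matched_vals = set()
--     for d in detected:
--         for k, a in enumerate(remaining):
--             if abs(d - a) <= tol:
--                 del remaining[k]
--                 matched_vals.add(d)
--                 break
--     return len(actual) - len(remaining), len(detected) - len(matched_vals), len(remaining)
-- ===== Notes on version B (the rewrite author's own statement) =====
-- stated objective: simpler
-- what changed: B drops A's two special-case early returns and the matched-index bookkeeping: instead of a set of matched actual indices re-scanned against the full actual list for every detection, B keeps a shrinking list of still-unmatched actual points and deletes the first one within tolerance, deriving TP/FN from its length.
import Mathlib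
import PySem

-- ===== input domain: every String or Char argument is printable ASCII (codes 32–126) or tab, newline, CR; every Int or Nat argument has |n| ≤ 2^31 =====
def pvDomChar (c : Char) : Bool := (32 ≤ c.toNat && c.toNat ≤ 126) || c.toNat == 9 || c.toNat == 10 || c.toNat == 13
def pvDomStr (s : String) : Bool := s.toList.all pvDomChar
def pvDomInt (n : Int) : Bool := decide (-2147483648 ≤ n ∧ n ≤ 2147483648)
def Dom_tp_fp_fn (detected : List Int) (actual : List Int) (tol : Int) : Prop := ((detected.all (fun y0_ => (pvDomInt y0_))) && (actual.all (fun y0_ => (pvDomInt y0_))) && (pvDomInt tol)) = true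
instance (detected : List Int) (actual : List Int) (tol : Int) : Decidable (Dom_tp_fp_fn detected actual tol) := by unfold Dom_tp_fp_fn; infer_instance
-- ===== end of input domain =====

-- B drops A's special-case early returns and matched-index set: it keeps a shrinking list of
-- still-unmatched actual points and deletes the first one within tolerance (simpler; same worst-case cost).


-- ===== PORT A =====
-- inner 'for i, a in enumerate(actual): … break' loop of A
def pvInnerA (tol d : Int) (ma md : PySem.Set Int) : List (Int × Int) → PySem.Set Int × PySem.Set Int
  | [] => (ma, md)
  | (i, a) :: rest =>
      if |d - a| ≤ tol ∧ i ∉ ma then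
        (PySem.Set.add ma i, PySem.Set.add md d)
      else pvInnerA tol d ma md rest

def tp_fp_fn (detected : List Int) (actual : List Int) (tol : Int) : Int × Int × Int :=
  if actual = [] then (0, (detected.length : Int), 0)
  else if detected = [] then (0, 0, (actual.length : Int))
  else
    let st := detected.foldl
      (fun st d => pvInnerA tol d st.1 st.2 (PySem.List.enumerate actual))
      (PySem.Set.empty, PySem.Set.empty)
    ((st.1.length : Int), (detected.length : Int) - st.2.length, (actual.length : Int) - st.1.length)

-- ===== PORT B =====
-- inner loop of B: delete the first remaining point within tolerance (none = no match)
def pvFindRemove (tol d : Int) : List Int → Option (List Int)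
  | [] => none
  | a :: rest =>
      if |d - a| ≤ tol then some rest
      else (pvFindRemove tol d rest).map (fun r => a :: r)

def tp_fp_fn_alt (detected : List Int) (actual : List Int) (tol : Int) : Int × Int × Int :=
  let st := detected.foldl
    (fun st d =>
      match pvFindRemove tol d st.1 with
      | some r => (r, PySem.Set.add st.2 d)
      | none => st)
    (actual, PySem.Set.empty)
  ((actual.length : Int) - st.1.length, (detected.length : Int) - st.2.length, (st.1.length : Int))

-- ===== PRECONDITION & SPEC =====
def Spec_tp_fp_fn (detected : List Int) (actual : List Int) (tol : Int) (out : Int × Int × Int) : Prop := out = tp_fp_fn_alt detected actual tol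
instance (detected : List Int) (actual : List Int) (tol : Int) (out : Int × Int × Int) : Decidable (Spec_tp_fp_fn detected actual tol out) := by unfold Spec_tp_fp_fn; infer_instance

-- ===== CLAIM (what is proved, stated in full; the proofs are below) =====
def Claim_equal_tp_fp_fn : Prop := ∀ (detected : List Int) (actual : List Int) (tol : Int), Dom_tp_fp_fn detected actual tol → Spec_tp_fp_fn detected actual tol (tp_fp_fn detected actual tol)

-- ===== LEMMAS AND PROOFS =====

-- B's remaining list = the actual points whose index is not in A's matched set
def pvFilt (ma : PySem.Set Int) (l : List (Int × Int)) : List Int :=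
  (l.filter (fun p => decide (p.1 ∉ ma))).map (fun p => p.2)

lemma pvFilt_cons_mem {ma : PySem.Set Int} {i a : Int} {rest : List (Int × Int)}
    (h : i ∈ ma) : pvFilt ma ((i, a) :: rest) = pvFilt ma rest := by
  simp [pvFilt, h]

lemma pvFilt_cons_not_mem {ma : PySem.Set Int} {i a : Int} {rest : List (Int × Int)}
    (h : i ∉ ma) : pvFilt ma ((i, a) :: rest) = a :: pvFilt ma rest := by
  simp [pvFilt, h]

lemma pvFilt_add {ma : PySem.Set Int} {i : Int} {l : List (Int × Int)}
    (hi : i ∉ l.map Prod.fst) : pvFilt (PySem.Set.add ma i) l = pvFilt ma l := by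
  unfold pvFilt
  congr 1
  apply List.filter_congr
  intro q hq
  have hqi : q.1 ≠ i := fun h => hi (h ▸ List.mem_map_of_mem hq)
  simp [PySem.Set.mem_add, hqi]

lemma pvFindRemove_some_length (tol d : Int) (xs r : List Int)
    (h : pvFindRemove tol d xs = some r) : r.length + 1 = xs.length := by
  induction xs generalizing r with
  | nil => simp [pvFindRemove] at h
  | cons a rest ih =>
      simp only [pvFindRemove] at h
      split_ifs at h with hc
      · cases h; simp
      · cases hr : pvFindRemove tol d rest with
        | none => rw [hr] at h; simp at h
        | some r' =>
            rw [hr] at h; simp at h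
            subst h; simp [ih r' hr]

-- the crux: one detection step, A's scan of enumerate(actual) vs B's scan of the remaining list
lemma pvKey (tol d : Int) (l : List (Int × Int)) (hnd : (l.map Prod.fst).Nodup)
    (ma md : PySem.Set Int) :
    (match pvFindRemove tol d (pvFilt ma l) with
     | none => pvInnerA tol d ma md l = (ma, md)
     | some r => ∃ i, i ∉ ma ∧ i ∈ l.map Prod.fst ∧
          pvInnerA tol d ma md l = (PySem.Set.add ma i, PySem.Set.add md d) ∧
          r = pvFilt (PySem.Set.add ma i) l) := by
  induction l generalizing ma with
  | nil => simp [pvFilt, pvFindRemove, pvInnerA]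
  | cons p rest ih =>
      obtain ⟨i, a⟩ := p
      simp only [List.map_cons, List.nodup_cons] at hnd
      obtain ⟨hi, hnd'⟩ := hnd
      by_cases hmem : i ∈ ma
      · -- index already matched: A skips the head, B's filter drops it
        rw [pvFilt_cons_mem hmem]
        have hstep : pvInnerA tol d ma md ((i, a) :: rest) = pvInnerA tol d ma md rest := by
          simp only [pvInnerA]
          rw [if_neg (fun h => h.2 hmem)]
        have := ih hnd' ma
        cases hr : pvFindRemove tol d (pvFilt ma rest) with
        | none => rw [hr] at this; rw [hstep]; exact this
        | some r =>
            rw [hr] at this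
            obtain ⟨j, hj1, hjm, hj2, hj3⟩ := this
            refine ⟨j, hj1, by simp [hjm], by rw [hstep]; exact hj2, ?_⟩
            rw [pvFilt_cons_mem ((PySem.Set.mem_add _ _ _).mpr (Or.inl hmem))]
            exact hj3
      · -- index unmatched: head survives B's filter
        rw [pvFilt_cons_not_mem hmem]
        by_cases htol : |d - a| ≤ tol
        · -- both sides match the head
          simp only [pvFindRemove]
          rw [if_pos htol]
          refine ⟨i, hmem, by simp, ?_, ?_⟩
          · simp only [pvInnerA]
            rw [if_pos ⟨htol, hmem⟩]
          · rw [pvFilt_cons_mem ((PySem.Set.mem_add _ _ _).mpr (Or.inr rfl)), pvFilt_add hi]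
        · -- neither side matches the head
          simp only [pvFindRemove]
          rw [if_neg htol]
          have hstep : pvInnerA tol d ma md ((i, a) :: rest) = pvInnerA tol d ma md rest := by
            simp only [pvInnerA]
            rw [if_neg (fun h => htol h.1)]
          have := ih hnd' ma
          cases hr : pvFindRemove tol d (pvFilt ma rest) with
          | none =>
              simp only [Option.map_none]
              rw [hstep]
              rw [hr] at this; exact this
          | some r =>
              simp only [Option.map_some]
              rw [hr] at this
              obtain ⟨j, hj1, hjm, hj2, hj3⟩ := this
              have hij : i ≠ j := fun h => hi (h ▸ hjm)
              refine ⟨j, hj1, by simp [hjm], by rw [hstep]; exact hj2, ?_⟩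
              rw [pvFilt_cons_not_mem (fun h => ((PySem.Set.mem_add _ _ _).mp h).elim hmem hij)]
              rw [hj3]

-- the fold invariant, pushed through the whole detected list
lemma pvFold (tol : Int) (actual : List Int) (detected : List Int)
    (ma md : PySem.Set Int) (rem : List Int)
    (h1 : rem = pvFilt ma (PySem.List.enumerate actual))
    (h2 : ma.length + rem.length = actual.length) :
    (detected.foldl (fun st d => pvInnerA tol d st.1 st.2 (PySem.List.enumerate actual)) (ma, md)).1.length
        + (detected.foldl (fun st d =>
            match pvFindRemove tol d st.1 with
            | some r => (r, PySem.Set.add st.2 d)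
            | none => st) (rem, md)).1.length = actual.length
    ∧ (detected.foldl (fun st d => pvInnerA tol d st.1 st.2 (PySem.List.enumerate actual)) (ma, md)).2
      = (detected.foldl (fun st d =>
            match pvFindRemove tol d st.1 with
            | some r => (r, PySem.Set.add st.2 d)
            | none => st) (rem, md)).2 := by
  induction detected generalizing ma md rem with
  | nil => exact ⟨h2, rfl⟩
  | cons d ds ih =>
      have hnd : ((PySem.List.enumerate actual).map Prod.fst).Nodup := by
        have hp := PySem.List.pairwise_lt_enumerate (xs := actual) (s := 0)
        have hlt : ((PySem.List.enumerate actual).map Prod.fst).Pairwise (· < ·) :=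
          List.pairwise_map.mpr hp
        exact hlt.imp (fun h => ne_of_lt h)
      have hkey := pvKey tol d (PySem.List.enumerate actual) hnd ma md
      simp only [List.foldl_cons]
      cases hr : pvFindRemove tol d rem with
      | none =>
          rw [h1] at hr
          rw [hr] at hkey
          rw [hkey]
          exact ih ma md rem h1 h2
      | some r =>
          rw [h1] at hr
          rw [hr] at hkey
          obtain ⟨i, hi1, _, hi2, hi3⟩ := hkey
          rw [hi2]
          have hlen : r.length + 1 = rem.length := by
            have := pvFindRemove_some_length tol d (pvFilt ma (PySem.List.enumerate actual)) r hr
            rw [← h1] at this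
            omega
          have haddlen : (PySem.Set.add ma i).length = ma.length + 1 := by
            rw [PySem.Set.add_of_not_mem hi1]; simp
          exact ih (PySem.Set.add ma i) (PySem.Set.add md d) r hi3 (by omega)

lemma pvFilt_empty (l : List (Int × Int)) :
    pvFilt PySem.Set.empty l = l.map (fun p => p.2) := by
  simp [pvFilt, PySem.Set.empty]

lemma pvFoldNil (tol : Int) (detected : List Int) (md : PySem.Set Int) :
    detected.foldl (fun st d =>
        match pvFindRemove tol d st.1 with
        | some r => (r, PySem.Set.add st.2 d)
        | none => st) (([] : List Int), md) = ([], md) := by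
  induction detected with
  | nil => rfl
  | cons d ds ih => simpa [pvFindRemove] using ih

-- ===== VERDICT (by name: the statement is the Claim_ definition above) =====
theorem tp_fp_fn_spec : Claim_equal_tp_fp_fn := by
  intro detected actual tol _
  unfold Spec_tp_fp_fn tp_fp_fn tp_fp_fn_alt
  by_cases ha : actual = []
  · subst ha
    simp [pvFoldNil, PySem.Set.empty]
  · rw [if_neg ha]
    by_cases hd : detected = []
    · subst hd
      simp [PySem.Set.empty]
    · rw [if_neg hd]
      have hinit : actual = pvFilt PySem.Set.empty (PySem.List.enumerate actual) := by
        rw [pvFilt_empty]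
        exact (PySem.List.map_snd_enumerate actual 0).symm
      obtain ⟨hlen, hmd⟩ := pvFold tol actual detected PySem.Set.empty PySem.Set.empty actual hinit
        (by simp [PySem.Set.empty])
      simp only [Prod.mk.injEq]
      refine ⟨by omega, by rw [hmd], by omega⟩
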